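-- pv_equiv track=rewrite | github.com/gayathritela/RCA-of-Cloud-Microservices | Pathtrace.py | get_all_paths_with_names
-- ===== SOURCE A (Python) =====
-- def find_all_paths(graph, start, end, path=[]):
--     path = path + [start]
--     if start == end:
--         return [path]
--     paths = []
--     for i, connection in enumerate(graph[start]):
--         if connection == 1 and i not in path:
--             newpaths = find_all_paths(graph, i, end, path)
--             for newpath in newpaths:
--                 paths.append(newpath)
--     return paths
--
-- def get_all_paths_with_names(graph, node_names):
--     all_paths = []
--     for start in range(len(graph)):
--         for end in range(len(graph)):
--             if start != end:
--                 paths = find_all_paths(graph, start, end)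
--                 # Convert node indices to names
--                 named_paths = [[node_names[node] for node in path] for path in paths]
--                 all_paths.extend(named_paths)
--     return all_paths
-- ===== SOURCE B (Python) =====
-- def _extend(graph, path, i):
--     # paths reachable by extending `path` through neighbors i, i+1, ... of its last node
--     row = graph[path[-1]]
--     if i >= len(row):
--         return []
--     rest = _extend(graph, path, i + 1)
--     if row[i] == 1 and i not in path:
--         return _paths(graph, path + [i]) + rest
--     return rest
--
-- def _paths(graph, path):
--     # all simple paths extending `path`, in preorder (the path itself first)
--     return [path] + _extend(graph, path, 0)
--
-- def get_all_paths_with_names(graph, node_names):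
--     n = len(graph)
--     out = []
--     for start in range(n):
--         bucket = {}
--         for p in _paths(graph, [start]):
--             bucket.setdefault(p[-1], []).append(p)
--         for end in range(n):
--             if end != start:
--                 out.extend([node_names[v] for v in p] for p in bucket.get(end, []))
--     return out
-- ===== Notes on version B (the rewrite author's own statement) =====
-- stated objective: faster
-- what changed: B runs one recursive DFS per start node enumerating all simple paths once and groups them into a dict bucketed by endpoint, then concatenates buckets per endpoint, instead of A's separate DFS for every (start, end) pair.
-- outside the precondition, e.g. on get_all_paths_with_names([[1, 1]], []): A returns [], B raises IndexError
import Mathlib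
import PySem

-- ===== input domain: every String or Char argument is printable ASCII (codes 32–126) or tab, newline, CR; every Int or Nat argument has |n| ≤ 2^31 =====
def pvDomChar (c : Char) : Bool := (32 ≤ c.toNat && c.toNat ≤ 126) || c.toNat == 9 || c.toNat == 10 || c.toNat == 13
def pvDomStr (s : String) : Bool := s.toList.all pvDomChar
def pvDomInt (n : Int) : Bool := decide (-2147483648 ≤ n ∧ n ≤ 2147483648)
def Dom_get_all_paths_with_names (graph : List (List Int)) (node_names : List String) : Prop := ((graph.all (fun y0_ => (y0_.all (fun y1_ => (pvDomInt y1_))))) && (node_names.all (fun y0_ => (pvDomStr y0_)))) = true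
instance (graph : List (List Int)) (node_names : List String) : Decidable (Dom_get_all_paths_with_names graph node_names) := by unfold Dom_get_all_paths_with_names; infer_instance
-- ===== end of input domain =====

-- B replaces A's DFS per (start, end) pair by a single DFS per start node that enumerates
-- all simple paths once and buckets them by endpoint in a dict (objective: faster).

-- ===== PORT A =====
-- find_all_paths: fuel = structural bound on recursion depth (graph.length+1 at the top call
-- suffices on Pre_-admitted inputs: path elements are distinct nodes < graph.length);
-- graph[start] / node_names[node] are ported with pyGet?; the `.getD` default is only reached
-- on inputs excluded by Pre_ (where Python raises IndexError).
def findAllPaths : Nat → List (List Int) → Int → Int → List Int → List (List Int)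
  | 0, _, _, _, _ => []
  | fuel+1, g, start, end_, path =>
    let path' := path ++ [start]
    if start = end_ then [path']
    else
      (PySem.List.enumerate ((PySem.List.pyGet? g start).getD []) 0).foldl
        (fun paths ic =>
          if ic.2 = 1 ∧ ic.1 ∉ path' then paths ++ findAllPaths fuel g ic.1 end_ path'
          else paths) []

def get_all_paths_with_names (graph : List (List Int)) (node_names : List String) : List (List String) :=
  (PySem.List.pyRange 0 (graph.length : Int) 1).foldl (fun all_paths start =>
    (PySem.List.pyRange 0 (graph.length : Int) 1).foldl (fun acc end_ =>
      if start ≠ end_ then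
        acc ++ (findAllPaths (graph.length + 1) graph start end_ []).map
          (fun p => p.map (fun node => (PySem.List.pyGet? node_names node).getD ""))
      else acc) all_paths) []

-- ===== PORT B =====
-- _paths/_extend: mutual recursion; _extend walks the adjacency row structurally carrying the
-- Python index i (row[i] / i >= len(row) become the cons/nil cases); same fuel convention as A's
-- port (fuel 0 is a totality guard, unreached for fuel = graph.length+1 on Pre_-admitted inputs).
mutual
def pathsB (fuel : Nat) (g : List (List Int)) (path : List Int) : List (List Int) :=
  match fuel with
  | 0 => []
  | fuel'+1 =>
    path :: extendB fuel' g path ((PySem.List.pyGet? g (PySem.List.pyGetD path (-1) 0)).getD []) 0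
termination_by (fuel, 0)

def extendB (fuel : Nat) (g : List (List Int)) (path : List Int) (row : List Int) (i : Int) :
    List (List Int) :=
  match row with
  | [] => []
  | c :: row' =>
    let rest := extendB fuel g path row' (i+1)
    if c = 1 ∧ i ∉ path then pathsB fuel g (path ++ [i]) ++ rest else rest
termination_by (fuel, row.length + 1)
end

-- bucket.setdefault(k, []).append(x) is ported as Dict.modify k [] (· ++ [x]) (same dict).
def get_all_paths_with_names_alt (graph : List (List Int)) (node_names : List String) : List (List String) :=
  (PySem.List.pyRange 0 (graph.length : Int) 1).foldl (fun out start =>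
    let bucket : PySem.Dict Int (List (List Int)) :=
      (pathsB (graph.length + 1) graph [start]).foldl
        (fun d p => d.modify (PySem.List.pyGetD p (-1) 0) [] (· ++ [p]))
        PySem.Dict.empty
    (PySem.List.pyRange 0 (graph.length : Int) 1).foldl (fun acc end_ =>
      if end_ ≠ start then
        acc ++ (bucket.getD end_ []).map
          (fun p => p.map (fun v => (PySem.List.pyGet? node_names v).getD ""))
      else acc) out) []

-- ===== PRECONDITION & SPEC =====
-- Pre_ excludes the inputs on which a DFS from some start raises IndexError: a 1-entry in a
-- column beyond the node count makes the DFS index past graph, and a non-loop 1-edge with an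
-- endpoint beyond node_names makes the naming step index past node_names (the nodes ever named
-- are exactly the endpoints of non-loop 1-edges); on one-node graphs with such an out-of-range
-- 1-column A returns [] without ever starting a DFS while B's DFS naturally raises, so those
-- are excluded too (see cites).
def Pre_get_all_paths_with_names (graph : List (List Int)) (node_names : List String) : Prop :=
  ((∀ row ∈ graph, ∀ p ∈ PySem.List.enumerate row 0, p.2 = 1 → p.1 < (graph.length : Int)) ∧
    ∀ q ∈ PySem.List.enumerate graph 0, ∀ p ∈ PySem.List.enumerate q.2 0,
      p.2 = 1 → p.1 ≠ q.1 →
        q.1 < (node_names.length : Int) ∧ p.1 < (node_names.length : Int))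
instance (graph : List (List Int)) (node_names : List String) : Decidable (Pre_get_all_paths_with_names graph node_names) := by unfold Pre_get_all_paths_with_names; infer_instance

def pvWitness_get_all_paths_with_names : List (List Int) × List String :=
  ([[0, 1], [1, 0]], ["a", "b"])

def Spec_get_all_paths_with_names (graph : List (List Int)) (node_names : List String) (out : List (List String)) : Prop := out = get_all_paths_with_names_alt graph node_names
instance (graph : List (List Int)) (node_names : List String) (out : List (List String)) : Decidable (Spec_get_all_paths_with_names graph node_names out) := by unfold Spec_get_all_paths_with_names; infer_instance

-- ===== CLAIM (what is proved, stated in full; the proofs are below) =====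
def Claim_equal_get_all_paths_with_names : Prop := ∀ (graph : List (List Int)) (node_names : List String), Dom_get_all_paths_with_names graph node_names → Pre_get_all_paths_with_names graph node_names → Spec_get_all_paths_with_names graph node_names (get_all_paths_with_names graph node_names)

-- ===== LEMMAS AND PROOFS =====

-- a foldl that conditionally extends its accumulator is a flatMap over the filtered list
theorem foldl_append_if_flatMap {α β : Type} (p : α → Prop) [DecidablePred p]
    (g : α → List β) (l : List α) (acc : List β) :
    l.foldl (fun a x => if p x then a ++ g x else a) acc
      = acc ++ (l.filter (fun x => decide (p x))).flatMap g := by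
  induction l generalizing acc with
  | nil => simp
  | cons x xs ih =>
    simp only [List.foldl_cons, List.filter_cons]
    by_cases h : p x
    · simp [h, ih, List.flatMap_cons]
    · simp [h, ih]

-- B's structural row walk is the flatMap over the filtered enumeration of the row
theorem extendB_eq_flatMap (fuel : Nat) (g : List (List Int)) (path : List Int) :
    ∀ (row : List Int) (i : Int),
      extendB fuel g path row i
        = ((PySem.List.enumerate row i).filter
            (fun ic => decide (ic.2 = 1 ∧ ic.1 ∉ path))).flatMap
            (fun ic => pathsB fuel g (path ++ [ic.1])) := by
  intro row
  induction row with
  | nil => intro i; simp [extendB, PySem.List.enumerate_nil]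
  | cons c row' ih =>
    intro i
    simp only [extendB, PySem.List.enumerate_cons, List.filter_cons]
    by_cases h : c = 1 ∧ i ∉ path
    · simp [h, ih, List.flatMap_cons]
    · simp [h, ih]

-- every path produced by the single DFS ends in a node not yet on the incoming path
theorem pathsB_last (fuel : Nat) (g : List (List Int)) :
    ∀ (node : Int) (path : List Int), node ∉ path →
      ∀ r ∈ pathsB fuel g (path ++ [node]),
        ∃ x, r.getLast? = some x ∧ x ∉ path := by
  induction fuel with
  | zero => intro node path _ r hr; simp [pathsB] at hr
  | succ fuel ih =>
    intro node path hnp r hr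
    simp only [pathsB, PySem.List.pyGetD_neg_one_append_singleton,
      extendB_eq_flatMap] at hr
    rcases List.mem_cons.mp hr with rfl | h
    · exact ⟨node, by simp, hnp⟩
    · rcases List.mem_flatMap.mp h with ⟨ic, hic, hr'⟩
      have hcond := of_decide_eq_true (List.mem_filter.mp hic).2
      rcases ih ic.1 (path ++ [node]) hcond.2 r hr' with ⟨x, hx, hxn⟩
      exact ⟨x, hx, fun hmem => hxn (List.mem_append_left _ hmem)⟩

-- A's targeted DFS result is exactly the endpoint filter of B's single DFS result
theorem findAllPaths_eq_filter (fuel : Nat) (g : List (List Int)) (end_ : Int) :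
    ∀ (node : Int) (path : List Int), node ∉ path →
      findAllPaths fuel g node end_ path
        = (pathsB fuel g (path ++ [node])).filter
            (fun p => decide (PySem.List.pyGetD p (-1) 0 = end_)) := by
  induction fuel with
  | zero => intro node path _; simp [findAllPaths, pathsB]
  | succ fuel ih =>
    intro node path hnp
    simp only [findAllPaths, pathsB, PySem.List.pyGetD_neg_one_append_singleton,
      extendB_eq_flatMap]
    rw [foldl_append_if_flatMap (fun ic : Int × Int => ic.2 = 1 ∧ ic.1 ∉ path ++ [node])]
    simp only [List.nil_append, List.filter_cons, List.filter_flatMap]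
    by_cases hne : node = end_
    · subst hne
      have hlast : PySem.List.pyGetD (path ++ [node]) (-1) 0 = node :=
        PySem.List.pyGetD_neg_one_append_singleton path node 0
      have hnil : ((PySem.List.enumerate ((PySem.List.pyGet? g node).getD []) 0).filter
            (fun x => decide (x.2 = 1 ∧ x.1 ∉ path ++ [node]))).flatMap
            (fun ic => (pathsB fuel g ((path ++ [node]) ++ [ic.1])).filter
              (fun p => decide (PySem.List.pyGetD p (-1) 0 = node))) = [] := by
        apply List.flatMap_eq_nil_iff.mpr
        intro ic hic
        apply List.filter_eq_nil_iff.mpr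
        intro r hr
        have hcond := of_decide_eq_true (List.mem_filter.mp hic).2
        rcases pathsB_last fuel g ic.1 (path ++ [node]) hcond.2 r hr with ⟨x, hx, hxn⟩
        have hxne : x ≠ node := fun h => hxn (h ▸ List.mem_append_right _ (by simp))
        rcases List.getLast?_eq_some_iff.mp hx with ⟨r', rfl⟩
        simp only [PySem.List.pyGetD_neg_one_append_singleton, decide_eq_true_eq]
        intro hc
        exact hxne hc
      rw [if_pos rfl, hnil]
      simp [hlast]
    · rw [if_neg hne]
      have hlast : PySem.List.pyGetD (path ++ [node]) (-1) 0 = node :=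
        PySem.List.pyGetD_neg_one_append_singleton path node 0
      simp only [hlast, decide_eq_true_eq, hne, if_false]
      apply List.flatMap_congr
      intro ic hic
      have hcond := of_decide_eq_true (List.mem_filter.mp hic).2
      exact ih ic.1 (path ++ [node]) hcond.2

-- the bucketing fold groups the paths: looking up key k yields the filtered, name-mapped list
theorem bucket_getD {ν : Type} (key : List Int → Int) (f : List Int → ν) :
    ∀ (ps : List (List Int)) (d : PySem.Dict Int (List ν)) (k : Int),
      (ps.foldl (fun d p => d.modify (key p) [] (· ++ [f p])) d).getD k []
        = d.getD k [] ++ ((ps.filter (fun p => decide (key p = k))).map f) := by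
  intro ps
  induction ps with
  | nil => intro d k; simp
  | cons p ps ih =>
    intro d k
    simp only [List.foldl_cons, List.filter_cons, ih]
    by_cases h : key p = k
    · subst h
      simp [PySem.Dict.getD_modify_self]
    · rw [PySem.Dict.getD_modify_of_ne _ _ _ (fun hk => h hk.symm)]
      simp [h]

-- ===== VERDICT (by name: the statement is the Claim_ definition above) =====
theorem get_all_paths_with_names_spec : Claim_equal_get_all_paths_with_names := by
  intro graph node_names _hdom _hpre
  unfold Spec_get_all_paths_with_names
  unfold get_all_paths_with_names get_all_paths_with_names_alt
  simp only [foldl_append_if_flatMap, PySem.List.foldl_append_eq_flatMap, List.nil_append]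
  apply List.flatMap_congr
  intro start _
  have hpred : (fun e : Int => decide (start ≠ e)) = (fun e : Int => decide (e ≠ start)) :=
    funext fun e => by simp [eq_comm]
  rw [hpred]
  apply List.flatMap_congr
  intro end_ _
  rw [findAllPaths_eq_filter (graph.length + 1) graph end_ start [] (by simp)]
  rw [bucket_getD]
  simp
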